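-- pv_equiv track=rewrite | github.com/MrBrantCode/unitest_baseline | mut_generate/mist_train_taco/taco_7644/solution.py | calculate_students_sat_down
-- ===== SOURCE A (Python) =====
-- def calculate_students_sat_down(N, F, S, friendships, slapped_students):
--     # Initialize data structures
--     frndsip_map = {i: [] for i in range(1, N + 1)}
--     studentlist = [False] * N
--     visitlist = {i: False for i in range(1, N + 1)}
--
--     # Populate friendship map
--     for A, B in friendships:
--         frndsip_map[A].append(B)
--
--     # Mark slapped students as visited
--     for student in slapped_students:
--         visitlist[student] = True
--
--     # Function to recursively mark friends as sitting down
--     def color_it(i):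
--         if len(frndsip_map[i]) > 0:
--             for j in frndsip_map[i]:
--                 if not visitlist[j]:
--                     studentlist[j - 1] = True
--                     visitlist[j] = True
--                     color_it(j)
--
--     # Process each slapped student
--     for i in slapped_students:
--         studentlist[i - 1] = True
--         color_it(i)
--
--     # Count the number of students who sat down
--     return sum(studentlist)
-- ===== SOURCE B (Python) =====
-- def calculate_students_sat_down(N, F, S, friendships, slapped_students):
--     # Iterative BFS over the friendship graph instead of recursive DFS with
--     # per-student boolean bookkeeping: seat everything reachable from the
--     # slapped students and return the size of that closure.
--     adj = {i: [] for i in range(1, N + 1)}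
--     for a, b in friendships:
--         adj[a].append(b)
--     visited = set(slapped_students)
--     queue = list(slapped_students)
--     head = 0
--     while head < len(queue):
--         u = queue[head]
--         head += 1
--         for v in adj[u]:
--             if v not in visited:
--                 visited.add(v)
--                 queue.append(v)
--     return len(visited)
-- ===== Notes on version B (the rewrite author's own statement) =====
-- stated objective: idiomatic
-- what changed: Replaced the recursive DFS with its three parallel structures (boolean seat list indexed by student-1, visited dict, recursive color_it) by an iterative BFS over a queue with a single visited set whose size is the answer.
import Mathlib
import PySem

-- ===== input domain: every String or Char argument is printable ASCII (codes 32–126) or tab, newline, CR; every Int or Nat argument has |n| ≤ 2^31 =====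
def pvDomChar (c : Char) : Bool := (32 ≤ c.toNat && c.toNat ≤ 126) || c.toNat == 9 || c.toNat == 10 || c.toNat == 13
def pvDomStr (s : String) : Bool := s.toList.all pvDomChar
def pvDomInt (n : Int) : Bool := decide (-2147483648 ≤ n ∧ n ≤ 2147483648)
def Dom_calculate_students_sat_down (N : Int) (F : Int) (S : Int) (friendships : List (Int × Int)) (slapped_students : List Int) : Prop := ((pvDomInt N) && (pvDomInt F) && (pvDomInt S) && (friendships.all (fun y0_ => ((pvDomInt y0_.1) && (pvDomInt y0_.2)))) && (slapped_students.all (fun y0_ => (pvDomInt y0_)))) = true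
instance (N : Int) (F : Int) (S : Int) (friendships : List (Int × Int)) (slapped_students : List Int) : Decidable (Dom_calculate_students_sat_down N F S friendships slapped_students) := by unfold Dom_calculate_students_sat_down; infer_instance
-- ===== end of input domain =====

-- B replaces A's recursive DFS (boolean seat list + visited dict) by an iterative BFS
-- with one visited set whose size is the answer (objective: idiomatic).

-- ===== PORT A =====
-- color_it: the recursive DFS closure over (studentlist, visitlist).  Python's recursion
-- terminates because each recursive call first marks a fresh node; the port carries a fuel
-- parameter, N.toNat + 1, which the proofs show is never exhausted under Pre_.
-- frndsip_map[i] / visitlist[j] are ported as Dict.getD (Python raises KeyError on a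
-- missing key; Pre_ excludes those inputs), studentlist[j-1] = True as pySetD (exact
-- Python index-assignment incl. negative wrap; IndexError excluded by Pre_).
def pvColorA (fmap : PySem.Dict Int (List Int)) :
    Nat → (List Bool × PySem.Dict Int Bool) → Int → (List Bool × PySem.Dict Int Bool)
  | 0, st, _ => st
  | fuel + 1, st, i =>
    let nbrs := fmap.getD i []
    if nbrs.length > 0 then
      nbrs.foldl (fun st j =>
        if ¬ (st.2.getD j false = true) then
          pvColorA fmap fuel (PySem.List.pySetD st.1 (j - 1) true, st.2.insert j true) j
        else st) st
    else st

def calculate_students_sat_down (N : Int) (F : Int) (S : Int) (friendships : List (Int × Int)) (slapped_students : List Int) : Int :=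
  -- frndsip_map = {i: [] for i in range(1, N + 1)}
  let fmap0 : PySem.Dict Int (List Int) :=
    (PySem.List.pyRange 1 (N + 1) 1).foldl (fun d i => d.insert i []) PySem.Dict.empty
  -- for A, B in friendships: frndsip_map[A].append(B)   (KeyError on missing A: outside Pre_)
  let fmap := friendships.foldl (fun d p => d.modify p.1 [] (fun l => l ++ [p.2])) fmap0
  -- studentlist = [False] * N
  let studentlist : List Bool := List.replicate N.toNat false
  -- visitlist = {i: False for i in range(1, N + 1)}
  let visit0 : PySem.Dict Int Bool :=
    (PySem.List.pyRange 1 (N + 1) 1).foldl (fun d i => d.insert i false) PySem.Dict.empty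
  -- for student in slapped_students: visitlist[student] = True
  let visit := slapped_students.foldl (fun d s => d.insert s true) visit0
  -- for i in slapped_students: studentlist[i-1] = True; color_it(i)
  let fin := slapped_students.foldl
    (fun st i => pvColorA fmap (N.toNat + 1) (PySem.List.pySetD st.1 (i - 1) true, st.2) i)
    (studentlist, visit)
  -- return sum(studentlist)
  fin.1.foldl (fun acc b => if b then acc + 1 else acc) 0

-- ===== PORT B =====
-- the while loop of Source B: pop queue[head], seat unvisited neighbours, append them.
-- Fuel = slapped.length + N.toNat + 1 bounds the number of iterations (= final queue
-- length) under Pre_; the proofs show it is never exhausted there.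
def pvBfs (adj : PySem.Dict Int (List Int)) :
    Nat → PySem.Set Int → List Int → Nat → PySem.Set Int
  | 0, vis, _, _ => vis
  | fuel + 1, vis, queue, head =>
    if head < queue.length then
      let u := PySem.List.pyGetD queue (head : Int) 0
      let p := (adj.getD u []).foldl
        (fun (p : PySem.Set Int × List Int) v =>
          if p.1.contains v then p else (PySem.Set.add p.1 v, p.2 ++ [v])) (vis, queue)
      pvBfs adj fuel p.1 p.2 (head + 1)
    else vis

def calculate_students_sat_down_alt (N : Int) (F : Int) (S : Int) (friendships : List (Int × Int)) (slapped_students : List Int) : Int :=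
  -- adj = {i: [] for i in range(1, N + 1)}; for a, b in friendships: adj[a].append(b)
  let adj0 : PySem.Dict Int (List Int) :=
    (PySem.List.pyRange 1 (N + 1) 1).foldl (fun d i => d.insert i []) PySem.Dict.empty
  let adj := friendships.foldl (fun d p => d.modify p.1 [] (fun l => l ++ [p.2])) adj0
  -- visited = set(slapped_students); queue = list(slapped_students); head = 0
  let visited : PySem.Set Int := PySem.Set.ofList slapped_students
  let fin := pvBfs adj (slapped_students.length + N.toNat + 1) visited slapped_students 0
  -- return len(visited)
  (PySem.Set.len fin : Int)

-- ===== PRECONDITION & SPEC =====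
-- pvReach computes which student ids are reachable from the slapped students along
-- friendships (a saturation of the edge relation; |friendships| growth rounds suffice).
-- It is a graph property of the INPUT used only to state Pre_; it computes no seat
-- counts and neither program's output.
def pvStep (fr : List (Int × Int)) (s : List Int) : List Int :=
  s ++ (fr.filter (fun p => s.contains p.1)).map (·.2)

def pvReach (fr : List (Int × Int)) (sl : List Int) : List Int :=
  (pvStep fr)^[fr.length] sl

-- Pre_ excludes exactly the inputs on which A raises: a friendship source or a slapped
-- student outside 1..N (KeyError/IndexError while building the map or seating), or an
-- out-of-range friendship target whose source is reachable from the slapped students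
-- (KeyError when the search visits it).  Unreached out-of-range targets stay inside
-- Pre_: there A returns normally and B is proved to match.  (Python B raises on the
-- same excluded inputs.)
def Pre_calculate_students_sat_down (N : Int) (F : Int) (S : Int) (friendships : List (Int × Int)) (slapped_students : List Int) : Prop :=
  (∀ p ∈ friendships, 1 ≤ p.1 ∧ p.1 ≤ N) ∧
  (∀ s ∈ slapped_students, 1 ≤ s ∧ s ≤ N) ∧
  (∀ p ∈ friendships, p.1 ∈ pvReach friendships slapped_students → 1 ≤ p.2 ∧ p.2 ≤ N)
instance (N : Int) (F : Int) (S : Int) (friendships : List (Int × Int)) (slapped_students : List Int) : Decidable (Pre_calculate_students_sat_down N F S friendships slapped_students) := by unfold Pre_calculate_students_sat_down; infer_instance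

def pvWitness_calculate_students_sat_down : Int × Int × Int × (List (Int × Int)) × List Int :=
  (3, 2, 1, [(1, 2), (2, 3)], [1])

def Spec_calculate_students_sat_down (N : Int) (F : Int) (S : Int) (friendships : List (Int × Int)) (slapped_students : List Int) (out : Int) : Prop := out = calculate_students_sat_down_alt N F S friendships slapped_students
instance (N : Int) (F : Int) (S : Int) (friendships : List (Int × Int)) (slapped_students : List Int) (out : Int) : Decidable (Spec_calculate_students_sat_down N F S friendships slapped_students out) := by unfold Spec_calculate_students_sat_down; infer_instance

-- ===== CLAIM (what is proved, stated in full; the proofs are below) =====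
def Claim_equal_calculate_students_sat_down : Prop := ∀ (N : Int) (F : Int) (S : Int) (friendships : List (Int × Int)) (slapped_students : List Int), Dom_calculate_students_sat_down N F S friendships slapped_students → Pre_calculate_students_sat_down N F S friendships slapped_students → Spec_calculate_students_sat_down N F S friendships slapped_students (calculate_students_sat_down N F S friendships slapped_students)

-- ===== LEMMAS AND PROOFS =====

-- The adjacency function the friendship dict realises, the list of edge targets,
-- the edge relation, and "x is in the reachable closure of the slapped students".
def pvAdj (fr : List (Int × Int)) (c : Int) : List Int :=
  (fr.filter (fun p => p.1 == c)).map (·.2)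

def pvTgt (fr : List (Int × Int)) : List Int := fr.map (·.2)

def pvE (fr : List (Int × Int)) (a b : Int) : Prop := b ∈ pvAdj fr a

def pvInCl (fr : List (Int × Int)) (sl : List Int) (x : Int) : Prop :=
  ∃ s ∈ sl, Relation.ReflTransGen (pvE fr) s x

def pvVis (d : PySem.Dict Int Bool) (x : Int) : Prop := d.getD x false = true

lemma pvAdj_sub_Tgt {fr : List (Int × Int)} {c j : Int} (h : j ∈ pvAdj fr c) :
    j ∈ pvTgt fr := by
  simp only [pvAdj, List.mem_map, List.mem_filter] at h
  obtain ⟨p, ⟨hp, _⟩, rfl⟩ := h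
  exact List.mem_map.mpr ⟨p, hp, rfl⟩

lemma pvInCl_step {fr : List (Int × Int)} {sl : List Int} {i j : Int}
    (h : pvInCl fr sl i) (e : pvE fr i j) : pvInCl fr sl j := by
  obtain ⟨s, hs, hr⟩ := h
  exact ⟨s, hs, hr.tail e⟩

lemma pvInCl_elim {fr : List (Int × Int)} {sl : List Int} (P : Int → Prop)
    (hseed : ∀ s ∈ sl, P s) (hcl : ∀ x, P x → ∀ j ∈ pvAdj fr x, P j) :
    ∀ x, pvInCl fr sl x → P x := by
  rintro x ⟨s, hs, hr⟩
  induction hr with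
  | refl => exact hseed s hs
  | tail _ e ih => exact hcl _ ih _ e

-- ===== pvReach characterisation: membership in pvReach ↔ reachability =====

lemma pvStep_mem (fr : List (Int × Int)) (s : List Int) (y : Int) :
    y ∈ pvStep fr s ↔ y ∈ s ∨ ∃ p ∈ fr, p.1 ∈ s ∧ p.2 = y := by
  simp [pvStep, List.mem_filter]

lemma pvStep_congr (fr : List (Int × Int)) (s t : List Int)
    (h : ∀ y, y ∈ s ↔ y ∈ t) : ∀ y, y ∈ pvStep fr s ↔ y ∈ pvStep fr t := by
  intro y
  rw [pvStep_mem, pvStep_mem]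
  constructor
  · rintro (hy | ⟨p, hp, h1, h2⟩)
    · exact Or.inl ((h y).mp hy)
    · exact Or.inr ⟨p, hp, (h p.1).mp h1, h2⟩
  · rintro (hy | ⟨p, hp, h1, h2⟩)
    · exact Or.inl ((h y).mpr hy)
    · exact Or.inr ⟨p, hp, (h p.1).mpr h1, h2⟩

lemma pvIter_mono (fr : List (Int × Int)) (n : Nat) :
    ∀ (sl : List Int), ∀ y ∈ sl, y ∈ (pvStep fr)^[n] sl := by
  induction n with
  | zero => intro sl y hy; simpa using hy
  | succ n ih =>
    intro sl y hy
    rw [Function.iterate_succ_apply]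
    exact ih _ y ((pvStep_mem fr sl y).mpr (Or.inl hy))

lemma pvIter_sound (fr : List (Int × Int)) (sl : List Int) (n : Nat) :
    ∀ x ∈ (pvStep fr)^[n] sl, pvInCl fr sl x := by
  induction n with
  | zero =>
    intro x hx
    exact ⟨x, by simpa using hx, Relation.ReflTransGen.refl⟩
  | succ n ih =>
    intro x hx
    rw [Function.iterate_succ_apply'] at hx
    rcases (pvStep_mem fr _ x).mp hx with hx | ⟨p, hp, h1, h2⟩
    · exact ih x hx
    · obtain ⟨s, hs, hr⟩ := ih p.1 h1
      refine ⟨s, hs, hr.tail ?_⟩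
      subst h2
      exact List.mem_map.mpr ⟨p, List.mem_filter.mpr ⟨hp, by simp⟩, rfl⟩

-- the iteration stabilises after |fr| rounds (each strict round adds a fresh target)
lemma pvReach_stable (fr : List (Int × Int)) (sl : List Int) :
    ∀ y, y ∈ (pvStep fr)^[fr.length + 1] sl ↔ y ∈ (pvStep fr)^[fr.length] sl := by
  by_cases hex : ∃ k, k ≤ fr.length ∧ ∀ y, y ∈ (pvStep fr)^[k + 1] sl ↔ y ∈ (pvStep fr)^[k] sl
  · obtain ⟨k, hk, heq⟩ := hex
    have key : ∀ d y, y ∈ (pvStep fr)^[k + d] sl ↔ y ∈ (pvStep fr)^[k] sl := by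
      intro d
      induction d with
      | zero => intro y; rfl
      | succ d ih =>
        intro y
        have h1 : (pvStep fr)^[k + (d + 1)] sl = pvStep fr ((pvStep fr)^[k + d] sl) := by
          rw [show k + (d + 1) = (k + d) + 1 by ring, Function.iterate_succ_apply']
        rw [h1, pvStep_congr fr _ _ ih y,
          show pvStep fr ((pvStep fr)^[k] sl) = (pvStep fr)^[k + 1] sl from
            (Function.iterate_succ_apply' _ _ _).symm]
        exact heq y
    intro y
    have e1 := key (fr.length + 1 - k) y
    have e2 := key (fr.length - k) y
    rw [show k + (fr.length + 1 - k) = fr.length + 1 by omega] at e1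
    rw [show k + (fr.length - k) = fr.length by omega] at e2
    rw [e1, e2]
  · push_neg at hex
    have hsub : ∀ k : Nat, ∀ y, y ∈ (pvStep fr)^[k] sl → y ∈ (pvStep fr)^[k + 1] sl := by
      intro k y hy
      rw [Function.iterate_succ_apply']
      exact (pvStep_mem fr _ y).mpr (Or.inl hy)
    have hcard : ∀ k : Nat, k ≤ fr.length →
        sl.toFinset.card + k ≤ ((pvStep fr)^[k] sl).toFinset.card := by
      intro k
      induction k with
      | zero => intro _; simp
      | succ k ih =>
        intro hk
        obtain ⟨y, hy⟩ := hex k (by omega)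
        have hy2 : y ∈ (pvStep fr)^[k + 1] sl ∧ y ∉ (pvStep fr)^[k] sl := by
          rcases hy with h | h
          · exact h
          · exact absurd (hsub k y h.2) h.1
        have hss : ((pvStep fr)^[k] sl).toFinset ⊂ ((pvStep fr)^[k + 1] sl).toFinset := by
          rw [Finset.ssubset_iff_of_subset
            (fun x hx => List.mem_toFinset.mpr (hsub k x (List.mem_toFinset.mp hx)))]
          exact ⟨y, List.mem_toFinset.mpr hy2.1, fun h => hy2.2 (List.mem_toFinset.mp h)⟩
        have := Finset.card_lt_card hss
        have := ih (by omega)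
        omega
    have hup : ∀ k : Nat, ∀ y ∈ (pvStep fr)^[k] sl, y ∈ sl ∨ y ∈ fr.map (·.2) := by
      intro k
      induction k with
      | zero => intro y hy; exact Or.inl (by simpa using hy)
      | succ k ih =>
        intro y hy
        rw [Function.iterate_succ_apply'] at hy
        rcases (pvStep_mem fr _ y).mp hy with hy | ⟨p, hp, _, h2⟩
        · exact ih y hy
        · exact Or.inr (List.mem_map.mpr ⟨p, hp, h2⟩)
    have hsubU : ((pvStep fr)^[fr.length] sl).toFinset ⊆ sl.toFinset ∪ (fr.map (·.2)).toFinset := by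
      intro x hx
      rcases hup fr.length x (List.mem_toFinset.mp hx) with h | h
      · exact Finset.mem_union.mpr (Or.inl (List.mem_toFinset.mpr h))
      · exact Finset.mem_union.mpr (Or.inr (List.mem_toFinset.mpr h))
    have hcardU : (sl.toFinset ∪ (fr.map (·.2)).toFinset).card ≤ sl.toFinset.card + fr.length := by
      have h1 := Finset.card_union_le sl.toFinset (fr.map (·.2)).toFinset
      have h2 := (fr.map (·.2)).toFinset_card_le
      simp only [List.length_map] at h2
      omega
    have heqF : ((pvStep fr)^[fr.length] sl).toFinset = sl.toFinset ∪ (fr.map (·.2)).toFinset := by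
      refine Finset.eq_of_subset_of_card_le hsubU ?_
      have := hcard fr.length le_rfl
      omega
    intro y
    constructor
    · intro hy
      rw [Function.iterate_succ_apply'] at hy
      rcases (pvStep_mem fr _ y).mp hy with hy | ⟨p, hp, _, h2⟩
      · exact hy
      · have : y ∈ sl.toFinset ∪ (fr.map (·.2)).toFinset :=
          Finset.mem_union.mpr (Or.inr (List.mem_toFinset.mpr (List.mem_map.mpr ⟨p, hp, h2⟩)))
        exact List.mem_toFinset.mp (heqF ▸ this)
    · exact hsub fr.length y

lemma pvReach_closed (fr : List (Int × Int)) (sl : List Int) :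
    ∀ p ∈ fr, p.1 ∈ pvReach fr sl → p.2 ∈ pvReach fr sl := by
  intro p hp h1
  apply (pvReach_stable fr sl p.2).mp
  rw [Function.iterate_succ_apply']
  exact (pvStep_mem fr _ p.2).mpr (Or.inr ⟨p, hp, h1, rfl⟩)

lemma pvReach_iff (fr : List (Int × Int)) (sl : List Int) (x : Int) :
    x ∈ pvReach fr sl ↔ pvInCl fr sl x := by
  constructor
  · exact pvIter_sound fr sl fr.length x
  · refine pvInCl_elim (fun x => x ∈ pvReach fr sl)
      (fun s hs => pvIter_mono fr fr.length sl s hs) ?_ x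
    intro y hy j hj
    simp only [pvAdj, List.mem_map, List.mem_filter] at hj
    obtain ⟨p, ⟨hp, hq⟩, rfl⟩ := hj
    exact pvReach_closed fr sl p hp (by rw [show p.1 = y from by simpa using hq]; exact hy)

-- ===== dictionary initialisation lemmas =====

lemma pv_getD_init (l : List Int) (v : Bool) (c : Int) :
    ((l.foldl (fun d i => d.insert i v) PySem.Dict.empty).getD c v) = v := by
  suffices h : ∀ d : PySem.Dict Int Bool, (∀ c, d.getD c v = v) →
      ∀ c, ((l.foldl (fun d i => d.insert i v) d).getD c v) = v by
    exact h _ (fun c => by simp [PySem.Dict.getD_empty]) c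
  induction l with
  | nil => intro d hd c; exact hd c
  | cons a l ih =>
    intro d hd c
    exact ih _ (fun c => by rw [PySem.Dict.getD_insert]; split <;> simp [hd]) c

lemma pv_getD_init_nil (l : List Int) (c : Int) :
    ((l.foldl (fun d i => d.insert i ([] : List Int)) PySem.Dict.empty).getD c []) = [] := by
  suffices h : ∀ d : PySem.Dict Int (List Int), (∀ c, d.getD c [] = []) →
      ∀ c, ((l.foldl (fun d i => d.insert i ([] : List Int)) d).getD c []) = [] by
    exact h _ (fun c => by simp [PySem.Dict.getD_empty]) c
  induction l with
  | nil => intro d hd c; exact hd c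
  | cons a l ih =>
    intro d hd c
    exact ih _ (fun c => by rw [PySem.Dict.getD_insert]; split <;> simp [hd]) c

-- the two builds of the friendship dict compute pvAdj
lemma pv_fmap_adj (N : Int) (fr : List (Int × Int)) (c : Int) :
    ((fr.foldl (fun d p => d.modify p.1 [] (fun l => l ++ [p.2]))
      ((PySem.List.pyRange 1 (N + 1) 1).foldl (fun d i => d.insert i []) PySem.Dict.empty)).getD c [])
      = pvAdj fr c := by
  rw [PySem.Dict.getD_foldl_modify_append, pv_getD_init_nil]
  simp [pvAdj]

-- visitlist after its two initialisation loops: true exactly on the slapped students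
lemma pv_vis0 (sl : List Int) (d : PySem.Dict Int Bool) (x : Int) :
    pvVis (sl.foldl (fun d s => d.insert s true) d) x ↔ x ∈ sl ∨ pvVis d x := by
  induction sl generalizing d with
  | nil => simp
  | cons a sl ih =>
    rw [List.foldl_cons, ih]
    simp only [pvVis, PySem.Dict.getD_insert, List.mem_cons]
    split
    · subst_vars; tauto
    · tauto

-- the "after vs before" relation a single color_it call establishes
def pvPost (fr : List (Int × Int)) (r : Int) (st st' : List Bool × PySem.Dict Int Bool) : Prop :=
  st'.1.length = st.1.length ∧
  (∀ x, pvVis st.2 x → pvVis st'.2 x) ∧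
  (∀ x, pvVis st'.2 x → pvVis st.2 x ∨ (x ∈ pvTgt fr ∧ Relation.ReflTransGen (pvE fr) r x)) ∧
  (∀ k : Nat, k < st.1.length →
    (st'.1.getD k false = true ↔
      st.1.getD k false = true ∨ (pvVis st'.2 ((k : Int) + 1) ∧ ¬ pvVis st.2 ((k : Int) + 1))))

lemma pvPost_refl (fr : List (Int × Int)) (r : Int) (st : List Bool × PySem.Dict Int Bool) :
    pvPost fr r st st :=
  ⟨rfl, fun _ h => h, fun _ h => Or.inl h, fun _ _ => by tauto⟩

lemma pvPost_trans {fr : List (Int × Int)} {r : Int} {st st₁ st₂ : List Bool × PySem.Dict Int Bool}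
    (h1 : pvPost fr r st st₁) (h2 : pvPost fr r st₁ st₂) : pvPost fr r st st₂ := by
  obtain ⟨l1, m1, s1, g1⟩ := h1
  obtain ⟨l2, m2, s2, g2⟩ := h2
  refine ⟨l2.trans l1, fun x h => m2 x (m1 x h), ?_, ?_⟩
  · intro x h
    rcases s2 x h with h | ⟨ht, hr⟩
    · exact s1 x h
    · exact Or.inr ⟨ht, hr⟩
  · intro k hk
    rw [g2 k (l1 ▸ hk), g1 k hk]
    constructor
    · rintro ((h | ⟨h1v, h0v⟩) | ⟨h2v, h1v⟩)
      · exact Or.inl h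
      · exact Or.inr ⟨m2 _ h1v, h0v⟩
      · refine Or.inr ⟨h2v, fun h0v => h1v (m1 _ h0v)⟩
    · rintro (h | ⟨h2v, h0v⟩)
      · exact Or.inl (Or.inl h)
      · by_cases h1v : pvVis st₁.2 ((k : Int) + 1)
        · exact Or.inl (Or.inr ⟨h1v, h0v⟩)
        · exact Or.inr ⟨h2v, h1v⟩

lemma pvPost_root {fr : List (Int × Int)} {r r' : Int} {st st' : List Bool × PySem.Dict Int Bool}
    (hr : Relation.ReflTransGen (pvE fr) r r') (h : pvPost fr r' st st') : pvPost fr r st st' := by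
  obtain ⟨l1, m1, s1, g1⟩ := h
  exact ⟨l1, m1, fun x hx => (s1 x hx).imp id (fun ⟨ht, hx⟩ => ⟨ht, hr.trans hx⟩), g1⟩

-- studentlist[j-1] = True, read back at position k (all marks lie in 1..length)
lemma pv_set_getD (st : List Bool) (i : Int) (h1 : 1 ≤ i) (h2 : i ≤ (st.length : Int))
    (k : Nat) (hk : k < st.length) :
    ((PySem.List.pySetD st (i - 1) true).getD k false = true ↔
      st.getD k false = true ∨ (k : Int) + 1 = i) := by
  rw [PySem.List.pySetD_of_nonneg st (i := i - 1) true (by omega)]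
  have hi : (i - 1).toNat < st.length := by omega
  rw [List.getD_eq_getElem?_getD, List.getD_eq_getElem?_getD, List.getElem?_set]
  by_cases h : (i - 1).toNat = k
  · simp [h, hk]; omega
  · have hne : ¬(i.toNat - 1 = k) := by omega
    have : (k : Int) + 1 ≠ i := by omega
    simp [h, hne, this]

lemma pv_length_pySetD (st : List Bool) (i : Int) (v : Bool) :
    (PySem.List.pySetD st i v).length = st.length := PySem.List.length_pySetD st i v

-- monotonicity of color_it in the visited dict
lemma pvColorA_mono (fmap : PySem.Dict Int (List Int)) :
    ∀ (fuel : Nat) (st : List Bool × PySem.Dict Int Bool) (i x : Int),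
      pvVis st.2 x → pvVis (pvColorA fmap fuel st i).2 x := by
  intro fuel
  induction fuel with
  | zero => intro st i x h; simpa [pvColorA] using h
  | succ fuel ih =>
    intro st i x h
    rw [pvColorA]
    split
    · -- foldl over the neighbour list
      generalize fmap.getD i [] = ns
      induction ns generalizing st with
      | nil => exact h
      | cons j ns ihn =>
        rw [List.foldl_cons]
        apply ihn
        dsimp only
        split
        · apply ih
          simpa [pvVis, PySem.Dict.getD_insert] using Or.inr h
        · exact h
    · exact h

lemma pvFoldA_mono (fmap : PySem.Dict Int (List Int)) (fuel : Nat) (ns : List Int) :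
    ∀ (st : List Bool × PySem.Dict Int Bool) (x : Int), pvVis st.2 x →
      pvVis (ns.foldl (fun st j =>
        if ¬ (st.2.getD j false = true) then
          pvColorA fmap fuel (PySem.List.pySetD st.1 (j - 1) true, st.2.insert j true) j
        else st) st).2 x := by
  induction ns with
  | nil => intro st x h; exact h
  | cons j ns ihn =>
    intro st x h
    rw [List.foldl_cons]
    apply ihn
    dsimp only
    split
    · apply pvColorA_mono
      simpa [pvVis, PySem.Dict.getD_insert] using Or.inr h
    · exact h

-- the pvPost relation holds of every color_it call rooted in the closure
lemma pvColorA_post (fmap : PySem.Dict Int (List Int)) (fr : List (Int × Int))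
    (sl : List Int) (L : Nat)
    (hadj : ∀ c, fmap.getD c [] = pvAdj fr c)
    (hReach : ∀ x, pvInCl fr sl x → 1 ≤ x ∧ x ≤ (L : Int)) :
    ∀ (fuel : Nat) (st : List Bool × PySem.Dict Int Bool) (i : Int),
      pvInCl fr sl i → st.1.length = L → pvPost fr i st (pvColorA fmap fuel st i) := by
  intro fuel
  induction fuel with
  | zero => intro st i _ _; exact pvPost_refl fr i st
  | succ fuel ih =>
    intro st i hi hL
    rw [pvColorA]
    split
    · rw [hadj]
      have haux : ∀ (ns : List Int), (∀ j ∈ ns, pvE fr i j) →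
          ∀ st : List Bool × PySem.Dict Int Bool, st.1.length = L →
          pvPost fr i st (ns.foldl (fun st j =>
            if ¬ (st.2.getD j false = true) then
              pvColorA fmap fuel (PySem.List.pySetD st.1 (j - 1) true, st.2.insert j true) j
            else st) st) := by
        intro ns
        induction ns with
        | nil => intro _ st _; exact pvPost_refl fr i st
        | cons j ns ihn =>
          intro hns st hLst
          rw [List.foldl_cons]
          split
          next hnv =>
            set st₁' : List Bool × PySem.Dict Int Bool :=
              (PySem.List.pySetD st.1 (j - 1) true, st.2.insert j true) with hst₁'
            have hEj : pvE fr i j := hns j (List.mem_cons_self ..)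
            have hjT : j ∈ pvTgt fr := pvAdj_sub_Tgt hEj
            have hjCl : pvInCl fr sl j := pvInCl_step hi hEj
            have hjb := hReach j hjCl
            -- post for the marking step
            have hmark : pvPost fr i st st₁' := by
              refine ⟨pv_length_pySetD _ _ _, ?_, ?_, ?_⟩
              · intro x hx
                simpa [pvVis, hst₁', PySem.Dict.getD_insert] using Or.inr hx
              · intro x hx
                simp only [pvVis, hst₁', PySem.Dict.getD_insert] at hx
                split at hx
                · subst_vars
                  exact Or.inr ⟨hjT, Relation.ReflTransGen.single hEj⟩
                · exact Or.inl hx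
              · intro k hk
                rw [show st₁'.1 = PySem.List.pySetD st.1 (j - 1) true from rfl,
                  pv_set_getD st.1 j hjb.1 (by rw [hLst]; exact hjb.2) k hk]
                simp only [pvVis, hst₁', PySem.Dict.getD_insert]
                constructor
                · rintro (h | h)
                  · exact Or.inl h
                  · refine Or.inr ⟨by simp [h], by rw [h]; exact hnv⟩
                · rintro (h | ⟨hv, hnv'⟩)
                  · exact Or.inl h
                  · split at hv
                    · omega
                    · exact absurd hv hnv'
            have hrec : pvPost fr i st₁' (pvColorA fmap fuel st₁' j) :=
              pvPost_root (Relation.ReflTransGen.single hEj)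
                (ih st₁' j hjCl (by simp [hst₁', pv_length_pySetD, hLst]))
            have hlen : (pvColorA fmap fuel st₁' j).1.length = L :=
              hrec.1.trans (by simp [hst₁', pv_length_pySetD, hLst])
            exact pvPost_trans (pvPost_trans hmark hrec)
              (ihn (fun j' hj' => hns j' (List.mem_cons_of_mem _ hj')) _ hlen)
          next =>
            exact ihn (fun j' hj' => hns j' (List.mem_cons_of_mem _ hj')) st hLst
      exact haux (pvAdj fr i) (fun _ h => h) st hL
    · exact pvPost_refl fr i st

-- with enough fuel, color_it visits all of i's neighbours and every newly
-- visited node's neighbours (U is a finite reservoir of possibly-unvisited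
-- closure targets; only closure nodes are ever newly visited)
lemma pvColorA_closed (fmap : PySem.Dict Int (List Int)) (fr : List (Int × Int))
    (sl : List Int)
    (hadj : ∀ c, fmap.getD c [] = pvAdj fr c) :
    ∀ (fuel : Nat) (U : Finset Int) (st : List Bool × PySem.Dict Int Bool) (i : Int),
      pvInCl fr sl i →
      (∀ x ∈ pvTgt fr, pvInCl fr sl x → x ∈ U ∨ pvVis st.2 x) → U.card < fuel →
      (∀ j ∈ pvAdj fr i, pvVis (pvColorA fmap fuel st i).2 j) ∧
      (∀ x, pvVis (pvColorA fmap fuel st i).2 x → ¬ pvVis st.2 x → pvInCl fr sl x →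
        ∀ j ∈ pvAdj fr x, pvVis (pvColorA fmap fuel st i).2 j) := by
  intro fuel
  induction fuel with
  | zero => intro U st i _ _ hf; omega
  | succ fuel ih =>
    intro U st i hi HU Hf
    rw [pvColorA]
    split
    next hpos =>
      rw [hadj] at hpos ⊢
      have haux : ∀ (ns : List Int), (∀ j ∈ ns, pvE fr i j) →
          ∀ st : List Bool × PySem.Dict Int Bool,
          (∀ x ∈ pvTgt fr, pvInCl fr sl x → x ∈ U ∨ pvVis st.2 x) →
          (∀ j ∈ ns, pvVis ((ns.foldl (fun st j =>
            if ¬ (st.2.getD j false = true) then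
              pvColorA fmap fuel (PySem.List.pySetD st.1 (j - 1) true, st.2.insert j true) j
            else st) st)).2 j) ∧
          (∀ x, pvVis ((ns.foldl (fun st j =>
            if ¬ (st.2.getD j false = true) then
              pvColorA fmap fuel (PySem.List.pySetD st.1 (j - 1) true, st.2.insert j true) j
            else st) st)).2 x → ¬ pvVis st.2 x → pvInCl fr sl x →
            ∀ j ∈ pvAdj fr x, pvVis ((ns.foldl (fun st j =>
              if ¬ (st.2.getD j false = true) then
                pvColorA fmap fuel (PySem.List.pySetD st.1 (j - 1) true, st.2.insert j true) j
              else st) st)).2 j) := by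
        intro ns
        induction ns with
        | nil =>
          intro _ st _
          exact ⟨by simp, fun x hx hnx _ => absurd hx hnx⟩
        | cons j ns ihn =>
          intro hns st HUst
          rw [List.foldl_cons]
          split
          next hnv =>
            set st₁' : List Bool × PySem.Dict Int Bool :=
              (PySem.List.pySetD st.1 (j - 1) true, st.2.insert j true) with hst₁'
            have hEj : pvE fr i j := hns j (List.mem_cons_self ..)
            have hjT : j ∈ pvTgt fr := pvAdj_sub_Tgt hEj
            have hjCl : pvInCl fr sl j := pvInCl_step hi hEj
            have hjU : j ∈ U := by
              rcases HUst j hjT hjCl with h | h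
              · exact h
              · exact absurd h hnv
            have hvj₁' : pvVis st₁'.2 j := by simp [pvVis, hst₁', PySem.Dict.getD_insert]
            have HU' : ∀ x ∈ pvTgt fr, pvInCl fr sl x → x ∈ U.erase j ∨ pvVis st₁'.2 x := by
              intro x hx hxCl
              rcases HUst x hx hxCl with h | h
              · by_cases hxj : x = j
                · exact Or.inr (hxj ▸ hvj₁')
                · exact Or.inl (Finset.mem_erase.mpr ⟨hxj, h⟩)
              · refine Or.inr ?_
                simpa [pvVis, hst₁', PySem.Dict.getD_insert] using Or.inr h
            have hcard : (U.erase j).card < fuel := by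
              have := Finset.card_erase_of_mem hjU
              have hpos : 0 < U.card := Finset.card_pos.mpr ⟨j, hjU⟩
              omega
            obtain ⟨hcov₁, hcl₁⟩ := ih (U.erase j) st₁' j hjCl HU' hcard
            set st₁ := pvColorA fmap fuel st₁' j with hst₁
            have hm₁ : ∀ x, pvVis st₁'.2 x → pvVis st₁.2 x :=
              fun x h => pvColorA_mono fmap fuel st₁' j x h
            have HUst₁ : ∀ x ∈ pvTgt fr, pvInCl fr sl x → x ∈ U ∨ pvVis st₁.2 x := by
              intro x hx hxCl
              rcases HUst x hx hxCl with h | h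
              · exact Or.inl h
              · exact Or.inr (hm₁ x (by simpa [pvVis, hst₁', PySem.Dict.getD_insert] using Or.inr h))
            obtain ⟨hcov₂, hcl₂⟩ := ihn (fun j' hj' => hns j' (List.mem_cons_of_mem _ hj')) st₁ HUst₁
            have hmrest : ∀ x, pvVis st₁.2 x →
                pvVis ((ns.foldl (fun st j =>
                  if ¬ (st.2.getD j false = true) then
                    pvColorA fmap fuel (PySem.List.pySetD st.1 (j - 1) true, st.2.insert j true) j
                  else st) st₁)).2 x := fun x h => pvFoldA_mono fmap fuel ns st₁ x h
            refine ⟨?_, ?_⟩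
            · intro j' hj'
              rcases List.mem_cons.mp hj' with rfl | hj'
              · exact hmrest _ (hm₁ _ hvj₁')
              · exact hcov₂ j' hj'
            · intro x hx hnx hxCl
              by_cases hx₁ : pvVis st₁.2 x
              · by_cases hx₁' : pvVis st₁'.2 x
                · -- x became visited at the marking step: x = j
                  have hxj : x = j := by
                    simp only [pvVis, hst₁', PySem.Dict.getD_insert] at hx₁'
                    split at hx₁'
                    · assumption
                    · exact absurd hx₁' hnx
                  subst hxj
                  intro j' hj'
                  exact hmrest _ (hcov₁ j' hj')
                · intro j' hj'
                  exact hmrest _ (hcl₁ x hx₁ hx₁' hxCl j' hj')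
              · exact hcl₂ x hx hx₁ hxCl
          next hv =>
            push_neg at hv
            obtain ⟨hcov₂, hcl₂⟩ := ihn (fun j' hj' => hns j' (List.mem_cons_of_mem _ hj')) st HUst
            refine ⟨?_, ?_⟩
            · intro j' hj'
              rcases List.mem_cons.mp hj' with rfl | hj'
              · exact pvFoldA_mono fmap fuel ns st j' hv
              · exact hcov₂ j' hj'
            · exact hcl₂
      exact haux (pvAdj fr i) (fun _ h => h) st HU
    next hpos =>
      rw [hadj] at hpos
      have : pvAdj fr i = [] := by
        cases h : pvAdj fr i with
        | nil => rfl
        | cons a l => rw [h] at hpos; simp at hpos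
      refine ⟨by simp [this], fun x hx hnx _ => absurd hx hnx⟩

-- the slapped-students loop of A: characterisation of its final state
lemma pvLoopA (fmap : PySem.Dict Int (List Int)) (fr : List (Int × Int))
    (sl : List Int) (L : Nat)
    (hadj : ∀ c, fmap.getD c [] = pvAdj fr c)
    (hReach : ∀ x, pvInCl fr sl x → 1 ≤ x ∧ x ≤ (L : Int)) :
    ∀ (l : List Int) (st : List Bool × PySem.Dict Int Bool), st.1.length = L →
      (∀ i ∈ l, pvInCl fr sl i) →
      ((l.foldl (fun st i =>
          pvColorA fmap (L + 1) (PySem.List.pySetD st.1 (i - 1) true, st.2) i) st).1.length = L) ∧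
      (∀ x, pvVis st.2 x → pvVis (l.foldl (fun st i =>
          pvColorA fmap (L + 1) (PySem.List.pySetD st.1 (i - 1) true, st.2) i) st).2 x) ∧
      (∀ x, pvVis (l.foldl (fun st i =>
          pvColorA fmap (L + 1) (PySem.List.pySetD st.1 (i - 1) true, st.2) i) st).2 x →
        pvVis st.2 x ∨ (x ∈ pvTgt fr ∧ ∃ s ∈ l, Relation.ReflTransGen (pvE fr) s x)) ∧
      (∀ i ∈ l, ∀ j ∈ pvAdj fr i, pvVis (l.foldl (fun st i =>
          pvColorA fmap (L + 1) (PySem.List.pySetD st.1 (i - 1) true, st.2) i) st).2 j) ∧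
      (∀ x, pvVis (l.foldl (fun st i =>
          pvColorA fmap (L + 1) (PySem.List.pySetD st.1 (i - 1) true, st.2) i) st).2 x →
        ¬ pvVis st.2 x → pvInCl fr sl x → ∀ j ∈ pvAdj fr x, pvVis (l.foldl (fun st i =>
          pvColorA fmap (L + 1) (PySem.List.pySetD st.1 (i - 1) true, st.2) i) st).2 j) ∧
      (∀ k : Nat, k < L →
        ((l.foldl (fun st i =>
            pvColorA fmap (L + 1) (PySem.List.pySetD st.1 (i - 1) true, st.2) i) st).1.getD k false = true ↔
          st.1.getD k false = true ∨ (k : Int) + 1 ∈ l ∨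
            (pvVis (l.foldl (fun st i =>
              pvColorA fmap (L + 1) (PySem.List.pySetD st.1 (i - 1) true, st.2) i) st).2 ((k : Int) + 1) ∧
             ¬ pvVis st.2 ((k : Int) + 1)))) := by
  intro l
  induction l with
  | nil =>
    intro st hL _
    refine ⟨hL, fun _ h => h, fun x h => Or.inl h, by simp,
      fun x hx hnx _ => absurd hx hnx, ?_⟩
    intro k hk; simp
  | cons i l ihl =>
    intro st hL hl
    have hiCl : pvInCl fr sl i := hl i (List.mem_cons_self ..)
    have hib := hReach i hiCl
    rw [List.foldl_cons]
    set st₁' : List Bool × PySem.Dict Int Bool := (PySem.List.pySetD st.1 (i - 1) true, st.2)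
      with hst₁'
    have hL₁' : st₁'.1.length = L := by simp [hst₁', hL]
    set st₁ := pvColorA fmap (L + 1) st₁' i with hst₁
    have hpost : pvPost fr i st₁' st₁ :=
      pvColorA_post fmap fr sl L hadj hReach (L + 1) st₁' i hiCl hL₁'
    have hL₁ : st₁.1.length = L := hpost.1.trans hL₁'
    have hUcard : ((Finset.Icc (1 : Int) (L : Int)).filter
        (fun x => ¬ (st₁'.2.getD x false = true))).card < L + 1 := by
      have h1 : ((Finset.Icc (1 : Int) (L : Int)).filter
          (fun x => ¬ (st₁'.2.getD x false = true))).card ≤ (Finset.Icc (1 : Int) (L : Int)).card :=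
        Finset.card_filter_le _ _
      have h2 : (Finset.Icc (1 : Int) (L : Int)).card = L := by
        rw [Int.card_Icc]; omega
      omega
    have hHU : ∀ x ∈ pvTgt fr, pvInCl fr sl x →
        x ∈ (Finset.Icc (1 : Int) (L : Int)).filter
          (fun x => ¬ (st₁'.2.getD x false = true)) ∨ pvVis st₁'.2 x := by
      intro x _ hxCl
      by_cases hv : st₁'.2.getD x false = true
      · exact Or.inr hv
      · refine Or.inl (Finset.mem_filter.mpr ⟨?_, by simpa using hv⟩)
        have := hReach x hxCl
        exact Finset.mem_Icc.mpr ⟨this.1, this.2⟩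
    obtain ⟨hcov₁, hcl₁⟩ := pvColorA_closed fmap fr sl hadj (L + 1) _ st₁' i hiCl hHU hUcard
    rw [← hst₁] at hcov₁ hcl₁
    clear_value st₁
    obtain ⟨Rlen, Rmono, Rsound, Rcov, Rcl, Rsl⟩ :=
      ihl st₁ hL₁ (fun i' hi' => hl i' (List.mem_cons_of_mem _ hi'))
    refine ⟨Rlen, ?_, ?_, ?_, ?_, ?_⟩
    · intro x hx
      exact Rmono x (hpost.2.1 x hx)
    · intro x hx
      rcases Rsound x hx with hx₁ | ⟨hT, s, hs, hr⟩
      · rcases hpost.2.2.1 x hx₁ with hx₀ | ⟨hT, hr⟩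
        · exact Or.inl hx₀
        · exact Or.inr ⟨hT, i, List.mem_cons_self .., hr⟩
      · exact Or.inr ⟨hT, s, List.mem_cons_of_mem _ hs, hr⟩
    · intro i' hi'
      rcases List.mem_cons.mp hi' with rfl | hi'
      · intro j hj; exact Rmono j (hcov₁ j hj)
      · exact Rcov i' hi'
    · intro x hx hnx hxCl
      by_cases hx₁ : pvVis st₁.2 x
      · intro j hj
        exact Rmono j (hcl₁ x hx₁ hnx hxCl j hj)
      · intro j hj
        exact Rcl x hx hx₁ hxCl j hj
    · intro k hk
      have h1 := hpost.2.2.2 k (by rw [hL₁']; exact hk)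
      rw [show st₁'.2 = st.2 from rfl] at h1
      rw [show st₁'.1 = PySem.List.pySetD st.1 (i - 1) true from rfl] at h1
      have hmark := pv_set_getD st.1 i hib.1 (by rw [hL]; exact hib.2) k (by rw [hL]; exact hk)
      rw [Rsl k hk, h1, hmark]
      simp only [List.mem_cons]
      have hm1 : pvVis st.2 ((k : Int) + 1) → pvVis st₁.2 ((k : Int) + 1) :=
        fun h => hpost.2.1 _ h
      have hm2 : pvVis st₁.2 ((k : Int) + 1) → pvVis ((l.foldl (fun st i =>
          pvColorA fmap (L + 1) (PySem.List.pySetD st.1 (i - 1) true, st.2) i) st₁)).2 ((k : Int) + 1) :=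
        Rmono _
      constructor
      · rintro (((h | h) | h) | h | h)
        · exact Or.inl h
        · exact Or.inr (Or.inl (Or.inl h))
        · exact Or.inr (Or.inr ⟨hm2 h.1, h.2⟩)
        · exact Or.inr (Or.inl (Or.inr h))
        · exact Or.inr (Or.inr ⟨h.1, fun hv => h.2 (hm1 hv)⟩)
      · rintro (h | (h | h) | h)
        · exact Or.inl (Or.inl (Or.inl h))
        · exact Or.inl (Or.inl (Or.inr h))
        · exact Or.inr (Or.inl h)
        · rcases Classical.em (pvVis st₁.2 ((k : Int) + 1)) with hv₁ | hv₁
          · exact Or.inl (Or.inr ⟨hv₁, h.2⟩)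
          · exact Or.inr (Or.inr ⟨h.1, hv₁⟩)

-- the inner neighbour loop of B's BFS step (T is a finite superset of ns)
lemma pvBfsFold (T : Finset Int) (ns : List Int) :
    ∀ (vis : PySem.Set Int) (queue : List Int), vis.Nodup → (∀ j ∈ ns, j ∈ T) →
      (∀ x ∈ vis, x ∈ (ns.foldl (fun (p : PySem.Set Int × List Int) v =>
        if p.1.contains v then p else (PySem.Set.add p.1 v, p.2 ++ [v])) (vis, queue)).1) ∧
      (∀ j ∈ ns, j ∈ (ns.foldl (fun (p : PySem.Set Int × List Int) v =>
        if p.1.contains v then p else (PySem.Set.add p.1 v, p.2 ++ [v])) (vis, queue)).1) ∧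
      (∀ x ∈ (ns.foldl (fun (p : PySem.Set Int × List Int) v =>
        if p.1.contains v then p else (PySem.Set.add p.1 v, p.2 ++ [v])) (vis, queue)).1,
        x ∈ vis ∨ x ∈ ns) ∧
      ((ns.foldl (fun (p : PySem.Set Int × List Int) v =>
        if p.1.contains v then p else (PySem.Set.add p.1 v, p.2 ++ [v])) (vis, queue)).1.Nodup) ∧
      (∃ t, (ns.foldl (fun (p : PySem.Set Int × List Int) v =>
          if p.1.contains v then p else (PySem.Set.add p.1 v, p.2 ++ [v])) (vis, queue)).2 = queue ++ t ∧
        (∀ x ∈ t, x ∈ (ns.foldl (fun (p : PySem.Set Int × List Int) v =>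
          if p.1.contains v then p else (PySem.Set.add p.1 v, p.2 ++ [v])) (vis, queue)).1) ∧
        (∀ x ∈ (ns.foldl (fun (p : PySem.Set Int × List Int) v =>
          if p.1.contains v then p else (PySem.Set.add p.1 v, p.2 ++ [v])) (vis, queue)).1,
          x ∉ vis → x ∈ t)) ∧
      ((ns.foldl (fun (p : PySem.Set Int × List Int) v =>
          if p.1.contains v then p else (PySem.Set.add p.1 v, p.2 ++ [v])) (vis, queue)).2.length +
        (T \ ((ns.foldl (fun (p : PySem.Set Int × List Int) v =>
          if p.1.contains v then p else (PySem.Set.add p.1 v, p.2 ++ [v])) (vis, queue)).1.toFinset)).card ≤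
        queue.length + (T \ vis.toFinset).card) := by
  induction ns with
  | nil =>
    intro vis queue hnd _
    exact ⟨fun x h => h, by simp, fun x h => Or.inl h, hnd,
      ⟨[], by simp, by simp, fun x hx hnx => absurd hx hnx⟩, le_refl _⟩
  | cons v ns ih =>
    intro vis queue hnd hns
    rw [List.foldl_cons]
    split
    next hc =>
      have hv : v ∈ vis := (PySem.Set.contains_iff vis v).mp hc
      obtain ⟨Imono, Icov, Isound, Ind, ⟨t, ht, htm, htc⟩, Icnt⟩ :=
        ih vis queue hnd (fun j hj => hns j (List.mem_cons_of_mem _ hj))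
      refine ⟨Imono, ?_, ?_, Ind, ⟨t, ht, htm, htc⟩, Icnt⟩
      · intro j hj
        rcases List.mem_cons.mp hj with rfl | hj
        · exact Imono j hv
        · exact Icov j hj
      · intro x hx
        rcases Isound x hx with h | h
        · exact Or.inl h
        · exact Or.inr (List.mem_cons_of_mem _ h)
    next hc =>
      have hv : v ∉ vis := fun h => hc ((PySem.Set.contains_iff vis v).mpr h)
      have hvb : v ∈ T := hns v (List.mem_cons_self ..)
      have hmem_add : ∀ y, y ∈ PySem.Set.add vis v ↔ y ∈ vis ∨ y = v :=
        fun y => PySem.Set.mem_add vis v y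
      obtain ⟨Imono, Icov, Isound, Ind, ⟨t, ht, htm, htc⟩, Icnt⟩ :=
        ih (PySem.Set.add vis v) (queue ++ [v]) (PySem.Set.nodup_add vis v hnd)
          (fun j hj => hns j (List.mem_cons_of_mem _ hj))
      refine ⟨?_, ?_, ?_, Ind, ⟨[v] ++ t, by rw [ht, List.append_assoc], ?_, ?_⟩, ?_⟩
      · intro x hx
        exact Imono x ((hmem_add x).mpr (Or.inl hx))
      · intro j hj
        rcases List.mem_cons.mp hj with rfl | hj
        · exact Imono j ((hmem_add j).mpr (Or.inr rfl))
        · exact Icov j hj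
      · intro x hx
        rcases Isound x hx with h | h
        · rcases (hmem_add x).mp h with h | rfl
          · exact Or.inl h
          · exact Or.inr (List.mem_cons_self ..)
        · exact Or.inr (List.mem_cons_of_mem _ h)
      · intro x hx
        rcases List.mem_append.mp hx with hx | hx
        · rw [List.mem_singleton] at hx
          exact hx ▸ Imono v ((hmem_add v).mpr (Or.inr rfl))
        · exact htm x hx
      · intro x hx hnx
        rcases Classical.em (x ∈ PySem.Set.add vis v) with h | h
        · rcases (hmem_add x).mp h with h | rfl
          · exact absurd h hnx
          · exact List.mem_append.mpr (Or.inl (List.mem_singleton.mpr rfl))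
        · exact List.mem_append.mpr (Or.inr (htc x hx h))
      · have hsub : (PySem.Set.add vis v).toFinset = insert v vis.toFinset := by
          ext y; simp [hmem_add y, or_comm]
        have hvd : v ∈ T \ vis.toFinset :=
          Finset.mem_sdiff.mpr ⟨hvb, fun h => hv (List.mem_toFinset.mp h)⟩
        have herase : T \ (insert v vis.toFinset) = (T \ vis.toFinset).erase v := by
          ext y; simp [Finset.mem_sdiff, Finset.mem_erase]; tauto
        have hcard : ((T \ vis.toFinset).erase v).card =
            (T \ vis.toFinset).card - 1 := Finset.card_erase_of_mem hvd
        have hpos : 0 < (T \ vis.toFinset).card :=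
          Finset.card_pos.mpr ⟨v, hvd⟩
        have := Icnt
        rw [hsub, herase] at this
        simp only [List.length_append, List.length_singleton] at this ⊢
        omega

-- the BFS while-loop of B: with enough fuel, its result contains the initial set,
-- is duplicate-free, sound for the closure, and closed under edges
lemma pvBfs_main (adj : PySem.Dict Int (List Int)) (fr : List (Int × Int)) (sl : List Int)
    (L : Nat)
    (hadj : ∀ c, adj.getD c [] = pvAdj fr c)
    (hReach : ∀ x, pvInCl fr sl x → 1 ≤ x ∧ x ≤ (L : Int)) :
    ∀ (fuel : Nat) (vis : PySem.Set Int) (queue : List Int) (head : Nat),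
      vis.Nodup →
      (∀ x ∈ queue, x ∈ vis) →
      (∀ x ∈ vis, x ∈ queue.drop head ∨ ∀ j ∈ pvAdj fr x, j ∈ vis) →
      (∀ x ∈ vis, pvInCl fr sl x) →
      ((queue.length - head) + ((Finset.Icc (1 : Int) (L : Int)) \ vis.toFinset).card < fuel) →
      (∀ x ∈ vis, x ∈ pvBfs adj fuel vis queue head) ∧
      (pvBfs adj fuel vis queue head).Nodup ∧
      (∀ x ∈ pvBfs adj fuel vis queue head, pvInCl fr sl x) ∧
      (∀ x ∈ pvBfs adj fuel vis queue head, ∀ j ∈ pvAdj fr x, j ∈ pvBfs adj fuel vis queue head) := by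
  intro fuel
  induction fuel with
  | zero => intro vis queue head _ _ _ _ hf; omega
  | succ fuel ih =>
    intro vis queue head hnd HQ HP HS Hf
    rw [pvBfs]
    split
    next h =>
      dsimp only
      have hu : PySem.List.pyGetD queue (head : Int) 0 = queue[head] := by
        rw [PySem.List.pyGetD_natCast, List.getD_eq_getElem?_getD, List.getElem?_eq_getElem h]
        rfl
      set u := PySem.List.pyGetD queue (head : Int) 0 with hudef
      have humem : u ∈ queue := by rw [hu]; exact List.getElem_mem h
      have huvis : u ∈ vis := HQ u humem
      have huCl : pvInCl fr sl u := HS u huvis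
      rw [hadj]
      have hnsT : ∀ j ∈ pvAdj fr u, j ∈ Finset.Icc (1 : Int) (L : Int) := by
        intro j hj
        have := hReach j (pvInCl_step huCl hj)
        exact Finset.mem_Icc.mpr ⟨this.1, this.2⟩
      obtain ⟨Fmono, Fcov, Fsound, Fnd, ⟨t, ht, htm, htc⟩, Fcnt⟩ :=
        pvBfsFold (Finset.Icc (1 : Int) (L : Int)) (pvAdj fr u) vis queue hnd hnsT
      set p := (pvAdj fr u).foldl (fun (p : PySem.Set Int × List Int) v =>
        if p.1.contains v then p else (PySem.Set.add p.1 v, p.2 ++ [v])) (vis, queue) with hp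
      have hqlen : queue.length ≤ p.2.length := by rw [ht]; simp
      have HQ' : ∀ x ∈ p.2, x ∈ p.1 := by
        intro x hx
        rw [ht] at hx
        rcases List.mem_append.mp hx with hx | hx
        · exact Fmono x (HQ x hx)
        · exact htm x hx
      have HP' : ∀ x ∈ p.1, x ∈ p.2.drop (head + 1) ∨ ∀ j ∈ pvAdj fr x, j ∈ p.1 := by
        intro x hx
        have hdrop : p.2.drop (head + 1) = queue.drop (head + 1) ++ t := by
          rw [ht, List.drop_append_of_le_length (by omega)]
        rcases Classical.em (x ∈ vis) with hxv | hxv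
        · rcases HP x hxv with hpend | hproc
          · rw [List.drop_eq_getElem_cons h] at hpend
            rcases List.mem_cons.mp hpend with rfl | hpend
            · exact Or.inr (fun j hj => Fcov j (by rw [hu]; exact hj))
            · exact Or.inl (by rw [hdrop]; exact List.mem_append.mpr (Or.inl hpend))
          · exact Or.inr (fun j hj => Fmono j (hproc j hj))
        · refine Or.inl ?_
          rw [hdrop]
          exact List.mem_append.mpr (Or.inr (htc x hx hxv))
      have HS' : ∀ x ∈ p.1, pvInCl fr sl x := by
        intro x hx
        rcases Classical.em (x ∈ vis) with hxv | hxv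
        · exact HS x hxv
        · rcases Fsound x hx with hxv' | hxn
          · exact absurd hxv' hxv
          · exact pvInCl_step huCl hxn
      have Hf' : (p.2.length - (head + 1)) +
          ((Finset.Icc (1 : Int) (L : Int)) \ p.1.toFinset).card < fuel := by
        omega
      obtain ⟨m1, m2, m3, m4⟩ := ih p.1 p.2 (head + 1) Fnd HQ' HP' HS' Hf'
      exact ⟨fun x hx => m1 x (Fmono x hx), m2, m3, m4⟩
    next h =>
      refine ⟨fun x hx => hx, hnd, HS, ?_⟩
      intro x hx j hj
      rcases HP x hx with hpend | hproc
      · rw [List.drop_eq_nil_of_le (by omega)] at hpend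
        simp at hpend
      · exact hproc j hj

lemma pvCountP_or_disjoint (l : List Nat) (p q : Nat → Bool)
    (h : ∀ x, ¬ (p x = true ∧ q x = true)) :
    l.countP (fun x => p x || q x) = l.countP p + l.countP q := by
  induction l with
  | nil => simp
  | cons a l ih =>
    simp only [List.countP_cons, ih]
    by_cases hp : p a = true
    · by_cases hq : q a = true
      · exact absurd ⟨hp, hq⟩ (h a)
      · simp [hp, hq]; omega
    · by_cases hq : q a = true <;> simp [hp, hq] <;> omega

-- a duplicate-free list of values in 1..L has as many elements as positions
-- k < L with k+1 in the list
lemma pvCountBridge (L : Nat) : ∀ (R : List Int), R.Nodup →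
    (∀ x ∈ R, ∃ k : Nat, k < L ∧ x = (k : Int) + 1) →
    (List.range L).countP (fun (k : Nat) => decide ((k : Int) + 1 ∈ R)) = R.length := by
  intro R
  induction R with
  | nil => intro _ _; simp
  | cons r R ih =>
    intro hnd hb
    obtain ⟨hr, hnd'⟩ := List.nodup_cons.mp hnd
    obtain ⟨kr, hkr, hreq⟩ := hb r (List.mem_cons_self ..)
    have h1 : (List.range L).countP (fun (k : Nat) => decide ((k : Int) + 1 ∈ r :: R)) =
        (List.range L).countP (fun (k : Nat) => decide ((k : Int) + 1 = r) || decide ((k : Int) + 1 ∈ R)) := by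
      apply List.countP_congr
      intro a _
      simp [List.mem_cons]
    have h2 : (List.range L).countP (fun (k : Nat) => decide ((k : Int) + 1 = r)) = 1 := by
      have hc : (List.range L).countP (fun (k : Nat) => decide ((k : Int) + 1 = r)) =
          (List.range L).countP (fun (k : Nat) => k == kr) := by
        apply List.countP_congr
        intro a _
        by_cases h : a = kr
        · simp [h, hreq]
        · have : ¬ ((a : Int) + 1 = r) := by omega
          simp [h, this]
      rw [hc]
      have : (List.range L).countP (fun (k : Nat) => k == kr) = (List.range L).count kr := rfl
      rw [this]
      exact List.count_eq_one_of_mem List.nodup_range (List.mem_range.mpr hkr)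
    have h3 : ∀ x : Nat, ¬ (decide ((x : Int) + 1 = r) = true ∧ decide ((x : Int) + 1 ∈ R) = true) := by
      intro x ⟨ha, hb'⟩
      simp only [decide_eq_true_eq] at ha hb'
      exact hr (ha ▸ hb')
    rw [h1, pvCountP_or_disjoint _ _ _ h3, h2, ih hnd'
      (fun x hx => hb x (List.mem_cons_of_mem _ hx))]
    rw [List.length_cons]
    omega

-- main equivalence: A's seat count equals the size of B's visited set
theorem pv_main (N F S : Int) (fr : List (Int × Int)) (sl : List Int)
    (hpre : Pre_calculate_students_sat_down N F S fr sl) :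
    calculate_students_sat_down N F S fr sl = calculate_students_sat_down_alt N F S fr sl := by
  obtain ⟨hfr, hsl, htg⟩ := hpre
  have HReach : ∀ x, pvInCl fr sl x → 1 ≤ x ∧ x ≤ ((N.toNat : Nat) : Int) := by
    intro x hx
    have hb : 1 ≤ x ∧ x ≤ N := by
      obtain ⟨s, hs, hr⟩ := hx
      rcases (Relation.ReflTransGen.cases_tail hr) with rfl | ⟨c, hc, e⟩
      · exact hsl _ hs
      · simp only [pvE, pvAdj, List.mem_map, List.mem_filter] at e
        obtain ⟨p, ⟨hp, hq⟩, rfl⟩ := e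
        refine htg p hp ((pvReach_iff fr sl p.1).mpr ?_)
        rw [show p.1 = c from by simpa using hq]
        exact ⟨s, hs, hc⟩
    omega
  unfold calculate_students_sat_down calculate_students_sat_down_alt
  dsimp only
  set FM := fr.foldl (fun d p => d.modify p.1 [] (fun l => l ++ [p.2]))
    ((PySem.List.pyRange 1 (N + 1) 1).foldl (fun d i => d.insert i []) PySem.Dict.empty) with hFM
  have hadj : ∀ c, FM.getD c [] = pvAdj fr c := fun c => pv_fmap_adj N fr c
  set VD := sl.foldl (fun d s => d.insert s true)
    ((PySem.List.pyRange 1 (N + 1) 1).foldl (fun d i => d.insert i false) PySem.Dict.empty) with hVD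
  have hvis0 : ∀ x, pvVis VD x ↔ x ∈ sl := by
    intro x
    rw [hVD, pv_vis0]
    have : pvVis ((PySem.List.pyRange 1 (N + 1) 1).foldl (fun d i => d.insert i false) PySem.Dict.empty) x ↔ False := by
      simp [pvVis, pv_getD_init]
    rw [this]
    tauto
  -- A side
  obtain ⟨Rlen, Rmono, Rsound, Rcov, Rcl, Rsl⟩ :=
    pvLoopA FM fr sl N.toNat hadj HReach sl (List.replicate N.toNat false, VD) (by simp)
      (fun i hi => ⟨i, hi, Relation.ReflTransGen.refl⟩)
  set stF := sl.foldl (fun st i =>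
    pvColorA FM (N.toNat + 1) (PySem.List.pySetD st.1 (i - 1) true, st.2) i)
    (List.replicate N.toNat false, VD) with hstF
  have hcharA : ∀ x, pvVis stF.2 x ↔ pvInCl fr sl x := by
    intro x
    constructor
    · intro h
      rcases Rsound x h with h0 | ⟨_, s, hs, hr⟩
      · exact ⟨x, (hvis0 x).mp h0, Relation.ReflTransGen.refl⟩
      · exact ⟨s, hs, hr⟩
    · refine pvInCl_elim (fun x => pvVis stF.2 x) ?_ ?_ x
      · intro s hs
        exact Rmono s ((hvis0 s).mpr hs)
      · intro y hy j hj
        have hyCl : pvInCl fr sl y := by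
          -- y is visited in the final state, hence in the closure
          rcases Rsound y hy with h0 | ⟨_, s, hs, hr⟩
          · exact ⟨y, (hvis0 y).mp h0, Relation.ReflTransGen.refl⟩
          · exact ⟨s, hs, hr⟩
        rcases Classical.em (pvVis VD y) with h0 | h0
        · exact Rcov y ((hvis0 y).mp h0) j hj
        · exact Rcl y hy h0 hyCl j hj
  -- B side
  set R := pvBfs FM (sl.length + N.toNat + 1) (PySem.Set.ofList sl) sl 0 with hR
  obtain ⟨Bmono, Bnd, Bsound, Bclosed⟩ :=
    pvBfs_main FM fr sl N.toNat hadj HReach (sl.length + N.toNat + 1) (PySem.Set.ofList sl) sl 0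
      (PySem.Set.nodup_ofList sl)
      (fun x hx => (PySem.Set.mem_ofList sl x).mpr hx)
      (fun x hx => Or.inl (by simpa using (PySem.Set.mem_ofList sl x).mp hx))
      (fun x hx => ⟨x, (PySem.Set.mem_ofList sl x).mp hx, Relation.ReflTransGen.refl⟩)
      (by
        have h1 : ((Finset.Icc (1 : Int) ((N.toNat : Nat) : Int)) \ (PySem.Set.ofList sl).toFinset).card ≤
            (Finset.Icc (1 : Int) ((N.toNat : Nat) : Int)).card :=
          Finset.card_le_card Finset.sdiff_subset
        have h2 : (Finset.Icc (1 : Int) ((N.toNat : Nat) : Int)).card = N.toNat := by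
          rw [Int.card_Icc]; omega
        omega)
  have hcharB : ∀ x, x ∈ R ↔ pvInCl fr sl x := by
    intro x
    constructor
    · exact Bsound x
    · refine pvInCl_elim (fun x => x ∈ R) ?_ ?_ x
      · intro s hs
        exact Bmono s ((PySem.Set.mem_ofList sl s).mpr hs)
      · exact Bclosed
  have hboundsB : ∀ x ∈ R, ∃ k : Nat, k < N.toNat ∧ x = (k : Int) + 1 := by
    intro x hx
    have hb := HReach x ((hcharB x).mp hx)
    exact ⟨(x - 1).toNat, by omega, by omega⟩
  -- the seat list is the indicator of membership in R
  have hlist : stF.1 = (List.range N.toNat).map (fun (k : Nat) => decide ((k : Int) + 1 ∈ R)) := by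
    apply List.ext_getElem (by simp [Rlen])
    intro k h1 h2
    have hk : k < N.toNat := by rw [Rlen] at h1; exact h1
    rw [List.getElem_map, List.getElem_range]
    apply Bool.eq_iff_iff.mpr
    rw [← List.getD_eq_getElem stF.1 false h1]
    rw [Rsl k hk]
    have hrepl : (List.replicate N.toNat false).getD k false = false := by simp
    rw [hrepl]
    have hiff : (pvVis stF.2 ((k : Int) + 1) ↔ ((k : Int) + 1) ∈ R) :=
      (hcharA _).trans (hcharB _).symm
    have hslv : ((k : Int) + 1 ∈ sl) → pvVis stF.2 ((k : Int) + 1) := by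
      intro h
      exact Rmono _ ((hvis0 _).mpr h)
    simp only [decide_eq_true_eq]
    constructor
    · rintro (h | h | ⟨h, _⟩)
      · exact absurd h (by simp)
      · exact hiff.mp (hslv h)
      · exact hiff.mp h
    · intro h
      rcases Classical.em (pvVis VD ((k : Int) + 1)) with h0 | h0
      · exact Or.inr (Or.inl ((hvis0 _).mp h0))
      · exact Or.inr (Or.inr ⟨hiff.mpr h, h0⟩)
  rw [PySem.List.foldl_if_add_one (fun b => b) stF.1 0, hlist, List.countP_map]
  have hcount : (List.range N.toNat).countP ((fun b => b) ∘ fun (k : Nat) => decide ((k : Int) + 1 ∈ R)) =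
      (List.range N.toNat).countP (fun (k : Nat) => decide ((k : Int) + 1 ∈ R)) := rfl
  rw [hcount, pvCountBridge N.toNat R Bnd hboundsB]
  have hlen : PySem.Set.len R = (R.length : Int) := rfl
  rw [hlen]
  omega

-- ===== VERDICT (by name: the statement is the Claim_ definition above) =====
theorem calculate_students_sat_down_spec : Claim_equal_calculate_students_sat_down := by
  intro N F S friendships slapped_students _ hpre
  exact pv_main N F S friendships slapped_students hpre
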